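-- pv_equiv track=rewrite | github.com/zack256/anaximander | main.py | url_for_article_name
-- ===== SOURCE A (Python) =====
-- import string
--
-- def url_for_article_name(name):
--     s = ""
--     for i in name:
--         if i == " ":
--             s += "-"
--         elif i in string.ascii_letters or i in string.digits:
--             s += i.lower()
--     return s
-- ===== SOURCE B (Python) =====
-- import string
--
-- def _keep(c):
--     return c == " " or c in string.ascii_letters or c in string.digits
--
-- def url_for_article_name(name):
--     # staged whole-string passes: 1) keep only spaces/letters/digits,
--     # 2) lowercase the survivors, 3) turn spaces into hyphens.
--     kept = "".join(filter(_keep, name))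
--     return kept.lower().replace(" ", "-")
-- ===== Notes on version B (the rewrite author's own statement) =====
-- stated objective: idiomatic
-- what changed: Replaced A's single per-character loop with an if/elif branch chain and accumulator appends by three staged whole-string passes: a filter keeping spaces/letters/digits, a whole-string lower(), and a replace of spaces by hyphens.
import Mathlib
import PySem

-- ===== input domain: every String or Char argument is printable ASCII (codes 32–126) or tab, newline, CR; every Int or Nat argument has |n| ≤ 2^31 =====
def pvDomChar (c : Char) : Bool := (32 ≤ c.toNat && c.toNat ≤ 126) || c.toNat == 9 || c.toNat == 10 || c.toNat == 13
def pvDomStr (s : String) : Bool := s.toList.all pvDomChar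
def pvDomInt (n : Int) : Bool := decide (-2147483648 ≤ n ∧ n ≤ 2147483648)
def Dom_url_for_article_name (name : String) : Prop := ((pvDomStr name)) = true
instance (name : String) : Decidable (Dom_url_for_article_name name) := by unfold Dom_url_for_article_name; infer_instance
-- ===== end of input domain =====

-- B replaces A's one per-character branch-and-append loop by three staged whole-string
-- passes (filter the kept characters, lowercase, replace spaces with hyphens).

-- ===== PORT A =====
-- the loop body of A: Python's s += … on the char list of s
def pvStepA (s : List Char) (c : Char) : List Char :=
  if c = ' ' then s ++ ['-']
  else if ("abcdefghijklmnopqrstuvwxyzABCDEFGHIJKLMNOPQRSTUVWXYZ".toList.contains c)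
          || ("0123456789".toList.contains c)
  then s ++ [PySem.Chars.lowerChar c] else s

def url_for_article_name (name : String) : String :=
  String.ofList (name.toList.foldl pvStepA [])

-- ===== PORT B =====
-- _keep of Source B
def pvKeep (c : Char) : Bool :=
  c == ' ' || ("abcdefghijklmnopqrstuvwxyzABCDEFGHIJKLMNOPQRSTUVWXYZ".toList.contains c)
           || ("0123456789".toList.contains c)

def url_for_article_name_alt (name : String) : String :=
  let kept := String.ofList (name.toList.filter pvKeep)  -- "".join(filter(_keep, name))
  PySem.Str.replace (PySem.Str.lower kept) " " "-"

-- ===== PRECONDITION & SPEC =====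
def Spec_url_for_article_name (name : String) (out : String) : Prop := out = url_for_article_name_alt name
instance (name : String) (out : String) : Decidable (Spec_url_for_article_name name out) := by unfold Spec_url_for_article_name; infer_instance

-- ===== CLAIM =====
def Claim_equal_url_for_article_name : Prop := ∀ (name : String), Dom_url_for_article_name name → Spec_url_for_article_name name (url_for_article_name name)

-- ===== LEMMAS AND PROOFS =====
-- A's step always appends at the right: factor the accumulator out
theorem pvStepA_shift (s : List Char) (c : Char) : pvStepA s c = s ++ pvStepA [] c := by
  unfold pvStepA; split_ifs <;> simp

-- replace with a one-character pattern is a per-character substitution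
theorem pv_replace_go_single (o : Char) (nw : List Char) :
    ∀ (fuel : Nat) (l acc : List Char), l.length ≤ fuel →
      PySem.Chars.replace.go [o] nw fuel l acc
        = acc.reverse ++ l.flatMap (fun c => if c = o then nw else [c]) := by
  intro fuel
  induction fuel with
  | zero =>
    intro l acc h
    have : l = [] := List.length_eq_zero_iff.mp (Nat.le_zero.mp h)
    subst this
    simp [PySem.Chars.replace.go]
  | succ n ih =>
    intro l acc h
    cases l with
    | nil => simp [PySem.Chars.replace.go]
    | cons c t =>
      simp only [PySem.Chars.replace.go]
      by_cases hc : c = o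
      · subst hc
        have hpre : List.isPrefixOf [c] (c :: t) = true := by
          simp [List.isPrefixOf]
        rw [if_pos hpre]
        simp only [List.length_cons] at h
        rw [ih _ _ (by simpa using Nat.le_of_succ_le_succ h)]
        simp
      · have hpre : List.isPrefixOf [o] (c :: t) = false := by
          simp [List.isPrefixOf]; exact fun h => absurd h.symm hc
        rw [if_neg (by simp [hpre])]
        simp only [List.length_cons] at h
        rw [ih _ _ (Nat.le_of_succ_le_succ h)]
        simp [hc]

theorem pv_replace_single (o : Char) (nw l : List Char) :
    PySem.Chars.replace l [o] nw = l.flatMap (fun c => if c = o then nw else [c]) := by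
  simp only [PySem.Chars.replace, List.isEmpty_cons, Bool.false_eq_true, if_false]
  simpa using pv_replace_go_single o nw l.length l [] le_rfl

-- per-character agreement of A's step with B's staged chain
set_option maxRecDepth 8192 in
theorem pv_pointwise_nat : ∀ n < 127,
    pvStepA [] (Char.ofNat n)
      = if pvKeep (Char.ofNat n) then
          (if PySem.Chars.lowerChar (Char.ofNat n) = ' ' then ['-']
           else [PySem.Chars.lowerChar (Char.ofNat n)])
        else [] := by decide

theorem pv_pointwise (c : Char) (h : pvDomChar c = true) :
    pvStepA [] c
      = if pvKeep c then
          (if PySem.Chars.lowerChar c = ' ' then ['-'] else [PySem.Chars.lowerChar c])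
        else [] := by
  have hlt : c.toNat < 127 := by
    simp only [pvDomChar, Bool.or_eq_true, Bool.and_eq_true, decide_eq_true_eq,
      beq_iff_eq] at h
    omega
  have := pv_pointwise_nat c.toNat hlt
  rwa [Char.ofNat_toNat] at this

-- the whole loop of A equals B's filter→lower→substitute chain
theorem pv_foldl (l : List Char) (h : ∀ c ∈ l, pvDomChar c = true) (acc : List Char) :
    l.foldl pvStepA acc
      = acc ++ ((l.filter pvKeep).map PySem.Chars.lowerChar).flatMap
          (fun c => if c = ' ' then ['-'] else [c]) := by
  induction l generalizing acc with
  | nil => simp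
  | cons x t ih =>
    simp only [List.foldl_cons]
    rw [ih (fun c hc => h c (List.mem_cons_of_mem _ hc)), pvStepA_shift,
      pv_pointwise x (h x List.mem_cons_self)]
    by_cases hx : pvKeep x = true
    · simp only [List.filter_cons, hx, if_pos, List.map_cons, List.flatMap_cons]
      split_ifs <;> simp_all
    · simp only [List.filter_cons, hx]
      simp_all

-- ===== VERDICT =====
theorem url_for_article_name_spec : Claim_equal_url_for_article_name := by
  intro name hdom
  unfold Spec_url_for_article_name url_for_article_name url_for_article_name_alt
  have hall : ∀ c ∈ name.toList, pvDomChar c = true := by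
    simpa [Dom_url_for_article_name, pvDomStr, List.all_eq_true] using hdom
  apply String.toList_inj.mp
  simp only [PySem.Str.toList_replace, PySem.Str.toList_lower]
  rw [pv_foldl name.toList hall []]
  simp [pv_replace_single, PySem.Chars.lower]
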